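-- pv_equiv track=rewrite | github.com/agnjuniorlima/GrafosIA | set_covering.py | set_cover
-- ===== SOURCE A (Python) =====
-- def set_cover(universe, subsets):
--     # Returns the minimum number of subsets required to cover the universe
--     elements = set(elem for subset in subsets for elem in subset)
--     if elements != universe:
--         return None
--     covering = []
--     subsets = list(subsets)
--     while subsets:
--         subset = subsets.pop()
--         covering.append(subset)
--         subsets = [s for s in subsets if not s.issubset(subset)]
--     return covering
-- ===== SOURCE B (Python) =====
-- def set_cover(universe, subsets):
--     # Single reverse pass with an accumulator instead of repeated pop/filter/rebuild.
--     elements = set(elem for subset in subsets for elem in subset)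
--     if elements != universe:
--         return None
--     covering = []
--     for subset in reversed(list(subsets)):
--         if not any(subset.issubset(c) for c in covering):
--             covering.append(subset)
--     return covering
-- ===== Notes on version B (the rewrite author's own statement) =====
-- stated objective: simpler
-- what changed: Replaces the destructive while/pop loop that rebuilds the remaining-subsets list after every pop with a single reverse pass keeping an accumulator of kept subsets, appending a subset only if it is not contained in any already-kept one.
import Mathlib
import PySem

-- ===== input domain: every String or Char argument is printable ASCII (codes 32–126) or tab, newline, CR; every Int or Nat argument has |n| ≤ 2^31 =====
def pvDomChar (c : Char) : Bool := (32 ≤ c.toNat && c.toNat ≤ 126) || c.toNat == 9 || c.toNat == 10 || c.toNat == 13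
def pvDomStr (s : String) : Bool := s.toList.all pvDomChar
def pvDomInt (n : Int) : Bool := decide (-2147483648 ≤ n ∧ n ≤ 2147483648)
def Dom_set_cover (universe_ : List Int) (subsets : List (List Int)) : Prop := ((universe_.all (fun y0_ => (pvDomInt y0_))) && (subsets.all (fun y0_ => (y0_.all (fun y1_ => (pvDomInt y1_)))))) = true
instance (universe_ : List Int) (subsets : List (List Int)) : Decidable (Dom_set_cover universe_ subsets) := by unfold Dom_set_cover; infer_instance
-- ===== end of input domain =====

-- B replaces A's destructive while/pop/rebuild loop by one reverse pass with an
-- accumulator (objective: simpler); same return value everywhere.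

-- ===== PORT A =====
-- while subsets: subset = subsets.pop(); covering.append(subset);
--                subsets = [s for s in subsets if not s.issubset(subset)]
def setCoverWhileA (subsets : List (List Int)) (covering : List (List Int)) :
    List (List Int) :=
  if h : subsets = [] then covering
  else
    let subset := subsets.getLast h
    let rest := subsets.dropLast
    setCoverWhileA (rest.filter (fun s => !(PySem.Set.issubset s subset)))
      (covering ++ [subset])
termination_by subsets.length
decreasing_by
  calc (List.filter _ rest).length ≤ rest.length := List.length_filter_le _ _
    _ < subsets.length := by
        simp [rest, List.length_dropLast]
        exact List.length_pos_iff.mpr h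

def set_cover (universe_ : List Int) (subsets : List (List Int)) :
    Option (List (List Int)) :=
  -- elements = set(elem for subset in subsets for elem in subset)
  let elements := PySem.Set.ofList (subsets.flatMap id)
  if !(PySem.Set.equal elements universe_) then none
  else some (setCoverWhileA subsets [])

-- ===== PORT B =====
-- for subset in reversed(list(subsets)):
--     if not any(subset.issubset(c) for c in covering): covering.append(subset)
def set_cover_alt (universe_ : List Int) (subsets : List (List Int)) :
    Option (List (List Int)) :=
  let elements := PySem.Set.ofList (subsets.flatMap id)
  if !(PySem.Set.equal elements universe_) then none
  else
    some (subsets.reverse.foldl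
      (fun covering subset =>
        if covering.any (fun c => PySem.Set.issubset subset c) then covering
        else covering ++ [subset]) [])

-- ===== PRECONDITION & SPEC =====
def Spec_set_cover (universe_ : List Int) (subsets : List (List Int)) (out : Option (List (List Int))) : Prop := out = set_cover_alt universe_ subsets
instance (universe_ : List Int) (subsets : List (List Int)) (out : Option (List (List Int))) : Decidable (Spec_set_cover universe_ subsets out) := by unfold Spec_set_cover; infer_instance

-- ===== CLAIM (what is proved, stated in full; the proofs are below) =====
def Claim_equal_set_cover : Prop := ∀ (universe_ : List Int) (subsets : List (List Int)), Dom_set_cover universe_ subsets → Spec_set_cover universe_ subsets (set_cover universe_ subsets)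

-- ===== LEMMAS AND PROOFS =====

-- B's loop body
def stepB (covering : List (List Int)) (subset : List Int) : List (List Int) :=
  if covering.any (fun c => PySem.Set.issubset subset c) then covering
  else covering ++ [subset]

theorem mem_stepB {t : List Int} {acc : List (List Int)} (s : List Int)
    (h : t ∈ acc) : t ∈ stepB acc s := by
  unfold stepB; split <;> simp [h]

-- a fold whose accumulator already contains t ignores the elements ⊆ t
theorem foldl_stepB_filter (t : List Int) :
    ∀ (l : List (List Int)) (acc : List (List Int)), t ∈ acc →
    (l.filter (fun s => !(PySem.Set.issubset s t))).foldl stepB acc =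
      l.foldl stepB acc := by
  intro l
  induction l with
  | nil => intro acc _; rfl
  | cons s l ih =>
    intro acc hacc
    by_cases hs : PySem.Set.issubset s t = true
    · have hstep : stepB acc s = acc := by
        unfold stepB
        have : acc.any (fun c => PySem.Set.issubset s c) = true :=
          List.any_eq_true.mpr ⟨t, hacc, hs⟩
        simp [this]
      simp [List.filter, hs, hstep, ih acc hacc]
    · simp only [List.filter, hs]
      simp only [List.foldl_cons]
      exact ih (stepB acc s) (mem_stepB s hacc)

theorem whileA_eq_foldB :
    ∀ (n : ℕ) (subsets covering : List (List Int)), subsets.length ≤ n →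
    (∀ s ∈ subsets, ∀ c ∈ covering, PySem.Set.issubset s c = false) →
    setCoverWhileA subsets covering = subsets.reverse.foldl stepB covering := by
  intro n
  induction n with
  | zero =>
    intro subsets covering hlen _
    have : subsets = [] := List.eq_nil_of_length_eq_zero (Nat.le_zero.mp hlen)
    subst this; simp [setCoverWhileA]
  | succ n ih =>
    intro subsets covering hlen hinv
    by_cases h : subsets = []
    · subst h; simp [setCoverWhileA]
    · rw [setCoverWhileA]
      simp only [h, dite_false]
      set subset := subsets.getLast h with hsub
      set rest := subsets.dropLast with hrest
      have hdecomp : subsets = rest ++ [subset] :=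
        (List.dropLast_append_getLast h).symm
      have hsubmem : subset ∈ subsets := List.getLast_mem h
      -- RHS
      have hrev : subsets.reverse = subset :: rest.reverse := by
        rw [hdecomp]; simp
      have hstep : stepB covering subset = covering ++ [subset] := by
        unfold stepB
        have : covering.any (fun c => PySem.Set.issubset subset c) = false := by
          rw [List.any_eq_false]
          intro c hc
          simp [hinv subset hsubmem c hc]
        simp [this]
      have hrestmem : ∀ s ∈ rest, s ∈ subsets := by
        intro s hs; rw [hdecomp]; exact List.mem_append_left _ hs
      have hlen' :
          (rest.filter (fun s => !(PySem.Set.issubset s subset))).length ≤ n := by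
        have h1 : (rest.filter (fun s => !(PySem.Set.issubset s subset))).length
            ≤ rest.length := List.length_filter_le _ _
        have h2 : rest.length < subsets.length := by
          rw [hdecomp]; simp
        omega
      have hinv' : ∀ s ∈ rest.filter (fun s => !(PySem.Set.issubset s subset)),
          ∀ c ∈ covering ++ [subset], PySem.Set.issubset s c = false := by
        intro s hs c hc
        have hsr := List.mem_filter.mp hs
        rcases List.mem_append.mp hc with hc | hc
        · exact hinv s (hrestmem s hsr.1) c hc
        · have : c = subset := by simpa using hc
          subst this
          simpa using hsr.2
      rw [ih _ _ hlen' hinv']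
      rw [hrev, List.foldl_cons, hstep]
      rw [← List.filter_reverse]
      exact foldl_stepB_filter subset rest.reverse (covering ++ [subset])
        (by simp)

-- ===== VERDICT (by name: the statement is the Claim_ definition above) =====
theorem set_cover_spec : Claim_equal_set_cover := by
  intro universe_ subsets _
  unfold Spec_set_cover set_cover set_cover_alt
  have hA := whileA_eq_foldB subsets.length subsets [] (le_refl _)
    (by intro s _ c hc; simp at hc)
  simp only [hA]
  rfl
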